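-- pv_equiv track=rewrite | github.com/pypi-data/pypi-mirror-231 | packages/game-base/game_base-0.0.3-py3-none-any.whl/game_base/base/game/base/logic/mahjong_utils.py | check_lug
-- ===== SOURCE A (Python) =====
-- def contain_size(cardlist, card):
--     """
--     :包含数量
--     :param cardlist:
--     :param card:
--     :return:
--     """
--     size = 0
--     for c in cardlist:
--         if c == card:
--             size += 1
--     return size
--
-- def check_lug(handlist):
--     """
--     :胡牌规则
--     :param handlist:
--     :return:
--     """
--     if 0 == len(handlist):
--         return True
--     temp = list()
--     temp.extend(handlist)
--     md_val = temp[0]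
--     temp.remove(md_val)
--     if 2 == contain_size(temp, md_val):
--         temp_same = list()
--         temp_same.extend(temp)
--         temp_same.remove(md_val)
--         temp_same.remove(md_val)
--         if check_lug(temp_same):
--             return True
--     if md_val + 1 in temp and md_val + 2 in temp:
--         temp_shun = list()
--         temp_shun.extend(temp)
--         temp_shun.remove(md_val + 1)
--         temp_shun.remove(md_val + 2)
--         if check_lug(temp_shun):
--             return True
--     return False
-- ===== SOURCE B (Python) =====
-- def check_lug(handlist):
--     """
--     Iterative level-synchronous BFS over the set of remaining-hand states
--     (tuples), deduplicated each level, instead of A's recursive backtracking.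
--     Each meld removes 3 tiles, so a winning decomposition is exactly a path of
--     len(handlist)//3 steps from the full hand to the empty hand.
--     """
--     frontier = {tuple(handlist)}
--     for _ in range(len(handlist) // 3):
--         nxt = set()
--         for s in frontier:
--             h = s[0]
--             t = list(s[1:])
--             if t.count(h) == 2:
--                 u = list(t)
--                 u.remove(h)
--                 u.remove(h)
--                 nxt.add(tuple(u))
--             if h + 1 in t and h + 2 in t:
--                 u = list(t)
--                 u.remove(h + 1)
--                 u.remove(h + 2)
--                 nxt.add(tuple(u))
--         frontier = nxt
--     return () in frontier
-- ===== Notes on version B (the rewrite author's own statement) =====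
-- stated objective: alternative
-- what changed: B replaces A's depth-first recursive backtracking (copy the list, try a meld, recurse, undo) by an iterative level-synchronous breadth-first search: it keeps a set of remaining-hand states, expands all of them one meld per round for len(handlist)//3 rounds with per-level deduplication, and tests whether the empty hand was reached.
import Mathlib
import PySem

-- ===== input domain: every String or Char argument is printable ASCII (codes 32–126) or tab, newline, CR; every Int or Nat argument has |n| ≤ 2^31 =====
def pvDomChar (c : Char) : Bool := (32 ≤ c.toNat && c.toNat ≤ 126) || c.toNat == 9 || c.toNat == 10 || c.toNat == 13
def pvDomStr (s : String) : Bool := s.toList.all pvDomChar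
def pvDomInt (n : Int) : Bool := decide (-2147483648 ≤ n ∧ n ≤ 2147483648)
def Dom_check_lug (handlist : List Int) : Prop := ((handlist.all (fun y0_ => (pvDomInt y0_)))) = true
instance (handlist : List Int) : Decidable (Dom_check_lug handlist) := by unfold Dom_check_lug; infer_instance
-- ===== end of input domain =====

-- B replaces A's recursive backtracking by an iterative level-synchronous BFS over a
-- deduplicated set of remaining-hand states (objective: alternative).

-- ===== PORT A =====
def containSize (cardlist : List Int) (card : Int) : Int :=
  cardlist.foldl (fun size c => if c == card then size + 1 else size) 0

-- termination helper for the port of A (removing an element shortens the list by one)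
theorem pv_remove?_length {xs ys : List Int} {v : Int}
    (h : PySem.List.remove? xs v = some ys) : ys.length + 1 = xs.length := by
  have hv : v ∈ xs := by
    by_contra hv
    rw [(PySem.List.remove?_eq_none_iff xs v).mpr hv] at h
    cases h
  rw [PySem.List.remove?_eq_some_erase xs v hv] at h
  cases h
  have := List.length_erase_of_mem hv
  have : 0 < xs.length := List.length_pos_of_mem hv
  omega

def check_lug (handlist : List Int) : Bool :=
  match handlist with
  | [] => true                       -- if 0 == len(handlist): return True
  | md_val :: temp =>                -- md_val = temp[0]; temp.remove(md_val) removes the first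
                                     -- occurrence of the head, i.e. yields the tail
    let same :=
      if (2 : Int) = containSize temp md_val then
        match h1 : PySem.List.remove? temp md_val with
        | some t1 =>
          (match h2 : PySem.List.remove? t1 md_val with
           | some t2 => check_lug t2
           | none => false)
        | none => false
      else false
    if same then true
    else
      let shun :=
        if (md_val + 1) ∈ temp ∧ (md_val + 2) ∈ temp then
          match h3 : PySem.List.remove? temp (md_val + 1) with
          | some s1 =>
            (match h4 : PySem.List.remove? s1 (md_val + 2) with
             | some s2 => check_lug s2
             | none => false)
          | none => false
        else false
      if shun then true else false
termination_by handlist.length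
decreasing_by
  · have e1 := pv_remove?_length h1
    have e2 := pv_remove?_length h2
    simp; omega
  · have e1 := pv_remove?_length h3
    have e2 := pv_remove?_length h4
    simp; omega

-- ===== PORT B =====
-- loop body of 'for s in frontier' in Source B: add s's successor states to the set nxt.
-- (Python would raise IndexError on s = (); inside the loop every frontier state has
-- length ≥ 3, so that case is unreachable — ported as 'return the set unchanged'.)
def bBody (acc : PySem.Set (List Int)) (s : List Int) : PySem.Set (List Int) :=
  match s with
  | [] => acc
  | h :: t =>
    let acc1 :=
      if PySem.List.count t h = 2 then
        match PySem.List.remove? t h with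
        | some u1 =>
          (match PySem.List.remove? u1 h with
           | some u2 => acc.add u2
           | none => acc)
        | none => acc
      else acc
    if h + 1 ∈ t ∧ h + 2 ∈ t then
      match PySem.List.remove? t (h + 1) with
      | some u1 =>
        (match PySem.List.remove? u1 (h + 2) with
         | some u2 => acc1.add u2
         | none => acc1)
      | none => acc1
    else acc1

-- one iteration of the outer 'for _ in range(len(handlist) // 3)' loop
def bStep (frontier : PySem.Set (List Int)) : PySem.Set (List Int) :=
  frontier.foldl bBody PySem.Set.empty

def check_lug_alt (handlist : List Int) : Bool :=
  let final :=
    (PySem.List.pyRange 0 (PySem.Int.floordiv (handlist.length : Int) 3) 1).foldl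
      (fun frontier _ => bStep frontier) (PySem.Set.ofList [handlist])
  PySem.Set.contains final []

-- ===== PRECONDITION & SPEC =====
def Spec_check_lug (handlist : List Int) (out : Bool) : Prop := out = check_lug_alt handlist
instance (handlist : List Int) (out : Bool) : Decidable (Spec_check_lug handlist out) := by unfold Spec_check_lug; infer_instance

-- ===== CLAIM (what is proved, stated in full; the proofs are below) =====
def Claim_equal_check_lug : Prop := ∀ (handlist : List Int), Dom_check_lug handlist → Spec_check_lug handlist (check_lug handlist)

-- ===== LEMMAS AND PROOFS =====

-- the (at most two) successor states of a state: remove the head's triplet / the run it starts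
def tripC (h : Int) (t : List Int) : Option (List Int) :=
  if (2 : Int) = containSize t h then
    match PySem.List.remove? t h with
    | some u1 => PySem.List.remove? u1 h
    | none => none
  else none

def runC (h : Int) (t : List Int) : Option (List Int) :=
  if h + 1 ∈ t ∧ h + 2 ∈ t then
    match PySem.List.remove? t (h + 1) with
    | some u1 => PySem.List.remove? u1 (h + 2)
    | none => none
  else none

def children (s : List Int) : List (List Int) :=
  match s with
  | [] => []
  | h :: t => (tripC h t).toList ++ (runC h t).toList

-- "a winning path of exactly k melds exists from s"
def W : Nat → List Int → Bool
  | 0, s => decide (s = [])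
  | k + 1, s => (children s).any (W k)

theorem containSize_eq (xs : List Int) (c : Int) :
    containSize xs c = (xs.count c : Int) := by
  have := PySem.List.foldl_beq_add_one (l := xs) (v := c) (a := (0 : Int))
  simpa [containSize] using this

theorem children_length {s c : List Int} (h : c ∈ children s) : c.length + 3 = s.length := by
  match s with
  | [] => simp [children] at h
  | hd :: t =>
    simp only [children, List.mem_append, Option.mem_toList] at h
    rcases h with h | h
    · unfold tripC at h
      split at h
      · split at h
        next u1 h1 =>
          have e1 := pv_remove?_length h1
          have e2 := pv_remove?_length h
          simp; omega
        next => cases h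
      · cases h
    · unfold runC at h
      split at h
      · split at h
        next u1 h1 =>
          have e1 := pv_remove?_length h1
          have e2 := pv_remove?_length h
          simp; omega
        next => cases h
      · cases h

-- one unfolding of A: success = some child succeeds (for a nonempty hand)
theorem check_lug_cons (h : Int) (t : List Int) :
    check_lug (h :: t) = (children (h :: t)).any check_lug := by
  rw [check_lug]
  simp only [children, List.any_append]
  have hor : forall x y : Bool, (if x = true then true else if y = true then true else false) = (x || y) := by
    intro x y; cases x <;> cases y <;> simp
  rw [hor]
  congr 1
  . unfold tripC
    split
    . split
      . split <;> (first | rfl | simp_all)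
      . first | rfl | simp_all
    . first | rfl | simp_all
  . unfold runC
    split
    . split
      . split <;> (first | rfl | simp_all)
      . first | rfl | simp_all
    . first | rfl | simp_all

theorem any_congr_mem {α : Type} (l : List α) (f g : α → Bool)
    (h : ∀ x ∈ l, f x = g x) : l.any f = l.any g := by
  induction l with
  | nil => rfl
  | cons x xs ih =>
    simp only [List.any_cons, h x (List.mem_cons_self), ih (fun y hy => h y (List.mem_cons_of_mem x hy))]

-- A computes W (n/3): every meld removes exactly 3 tiles
theorem check_lug_eq_W (n : Nat) : ∀ s : List Int, s.length = n →
    check_lug s = W (s.length / 3) s := by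
  induction n using Nat.strong_induction_on with
  | _ n IH =>
  intro s hn
  match s with
  | [] => simp [check_lug, W]
  | h :: t =>
    rw [check_lug_cons]
    by_cases hlen : 3 ≤ t.length + 1
    · have hdiv : (h :: t).length / 3 = ((h :: t).length - 3) / 3 + 1 := by
        simp only [List.length_cons]; omega
      rw [hdiv, W]
      refine any_congr_mem _ _ _ (fun c hc => ?_)
      have hl := children_length hc
      have := IH c.length (by omega) c rfl
      rw [this]
      congr 1
      omega
    · have hch : children (h :: t) = [] := by
        apply List.eq_nil_iff_forall_not_mem.mpr
        intro c hc
        have := children_length hc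
        simp at this
        omega
      have hdiv : (h :: t).length / 3 = 0 := by
        simp only [List.length_cons]; omega
      rw [hch, hdiv]
      simp [W]

-- membership in B's loop body: acc plus s's children
theorem mem_bBody (acc : PySem.Set (List Int)) (s c : List Int) :
    c ∈ bBody acc s ↔ c ∈ acc ∨ c ∈ children s := by
  match s with
  | [] => simp [bBody, children]
  | h :: t =>
    have hguard : (PySem.List.count t h = 2) ↔ ((2 : Int) = containSize t h) := by
      rw [containSize_eq, PySem.List.count_eq]
      omega
    simp only [bBody, children, List.mem_append, Option.mem_toList]
    unfold tripC runC
    simp only [← hguard]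
    split <;> split <;>
      (try split) <;> (try split) <;> (try split) <;> (try split) <;>
      simp_all [PySem.Set.mem_add] <;> tauto

theorem mem_foldl_bBody (F : List (List Int)) :
    ∀ (acc : PySem.Set (List Int)) (c : List Int),
    c ∈ F.foldl bBody acc ↔ c ∈ acc ∨ ∃ s ∈ F, c ∈ children s := by
  induction F with
  | nil => intro acc c; simp
  | cons s rest ih =>
    intro acc c
    rw [List.foldl_cons, ih, mem_bBody]
    simp only [List.mem_cons]
    constructor
    · rintro ((h | h) | ⟨s', hs', hc⟩)
      · exact Or.inl h
      · exact Or.inr ⟨s, Or.inl rfl, h⟩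
      · exact Or.inr ⟨s', Or.inr hs', hc⟩
    · rintro (h | ⟨s', hs' | hs', hc⟩)
      · exact Or.inl (Or.inl h)
      · exact Or.inl (Or.inr (hs' ▸ hc))
      · exact Or.inr ⟨s', hs', hc⟩

theorem mem_bStep (F : PySem.Set (List Int)) (c : List Int) :
    c ∈ bStep F ↔ ∃ s ∈ F, c ∈ children s := by
  unfold bStep
  rw [mem_foldl_bBody]
  simp [PySem.Set.empty]

-- the frontier after k steps contains [] iff some start state wins in exactly k melds
theorem empty_mem_iterate (k : Nat) : ∀ F : PySem.Set (List Int),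
    ([] ∈ bStep^[k] F) ↔ ∃ s ∈ F, W k s = true := by
  induction k with
  | zero => intro F; simp [W]
  | succ k ih =>
    intro F
    rw [Function.iterate_succ_apply, ih]
    constructor
    · rintro ⟨s', hs', hw⟩
      rw [mem_bStep] at hs'
      obtain ⟨s, hs, hc⟩ := hs'
      exact ⟨s, hs, by rw [W]; exact List.any_eq_true.mpr ⟨s', hc, hw⟩⟩
    · rintro ⟨s, hs, hw⟩
      rw [W] at hw
      obtain ⟨s', hc, hw'⟩ := List.any_eq_true.mp hw
      exact ⟨s', (mem_bStep F s').mpr ⟨s, hs, hc⟩, hw'⟩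

theorem foldl_const_eq_iterate {α β : Type} (g : α → α) (l : List β) :
    ∀ a : α, l.foldl (fun x _ => g x) a = g^[l.length] a := by
  induction l with
  | nil => intro a; rfl
  | cons b rest ih =>
    intro a
    rw [List.foldl_cons, ih, List.length_cons, Function.iterate_succ_apply]

-- ===== VERDICT (by name: the statement is the Claim_ definition above) =====
theorem check_lug_spec : Claim_equal_check_lug := by
  intro l _
  unfold Spec_check_lug check_lug_alt
  rw [foldl_const_eq_iterate]
  have hflr : PySem.Int.floordiv (l.length : Int) 3 = ((l.length / 3 : Nat) : Int) := by
    simp only [PySem.Int.floordiv]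
    rw [Int.fdiv_eq_ediv_of_nonneg _ (by norm_num)]
    omega
  have hlen : (PySem.List.pyRange 0 (PySem.Int.floordiv (l.length : Int) 3) 1).length
      = l.length / 3 := by
    rw [hflr, PySem.List.length_pyRange_one]
    omega
  rw [hlen]
  rw [check_lug_eq_W l.length l rfl]
  rcases hb : PySem.Set.contains (bStep^[l.length / 3] (PySem.Set.ofList [l])) [] with _ | _
  · rcases hw : W (l.length / 3) l with _ | _
    · rfl
    · exfalso
      have : [] ∈ bStep^[l.length / 3] (PySem.Set.ofList [l]) := by
        rw [empty_mem_iterate]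
        exact ⟨l, by simp [PySem.Set.mem_ofList], hw⟩
      rw [← PySem.Set.contains_iff] at this
      rw [hb] at this
      cases this
  · have := (PySem.Set.contains_iff _ _).mp hb
    rw [empty_mem_iterate] at this
    obtain ⟨s, hs, hw⟩ := this
    have hsl : s = l := by simpa [PySem.Set.mem_ofList] using hs
    rw [hsl] at hw
    rw [hw]
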